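-- pv_equiv track=rewrite | github.com/Ademeichen/WebScan | backend/ai_agents/utils/input_validator.py | sanitize_for_shell
-- ===== SOURCE A (Python) =====
-- def sanitize_for_shell(input_str: str) -> str:
--     """
--     为Shell命令清洗输入
--
--     Args:
--         input_str: 待清洗的输入字符串
--
--     Returns:
--         str: 清洗后的字符串
--     """
--     if not input_str:
--         return ""
--
--     sanitized = input_str
--
--     dangerous_chars = ['$', '`', '|', ';', '&', '<', '>', '(', ')', '{', '}', '[', ']', '*', '?', '!', '\n', '\r']
--
--     for char in dangerous_chars:
--         sanitized = sanitized.replace(char, '')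
--
--     return sanitized
-- ===== SOURCE B (Python) =====
-- _DANGEROUS = {'$', '`', '|', ';', '&', '<', '>', '(', ')', '{', '}', '[', ']', '*', '?', '!', '\n', '\r'}
--
-- def sanitize_for_shell(input_str: str) -> str:
--     if not input_str:
--         return ""
--     return ''.join(c for c in input_str if c not in _DANGEROUS)
-- ===== Notes on version B (the rewrite author's own statement) =====
-- stated objective: simpler
-- what changed: B makes a single pass over the input filtering characters by membership in a constant set, instead of A's 18 sequential full-string replace passes (one per forbidden character).
import Mathlib
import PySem

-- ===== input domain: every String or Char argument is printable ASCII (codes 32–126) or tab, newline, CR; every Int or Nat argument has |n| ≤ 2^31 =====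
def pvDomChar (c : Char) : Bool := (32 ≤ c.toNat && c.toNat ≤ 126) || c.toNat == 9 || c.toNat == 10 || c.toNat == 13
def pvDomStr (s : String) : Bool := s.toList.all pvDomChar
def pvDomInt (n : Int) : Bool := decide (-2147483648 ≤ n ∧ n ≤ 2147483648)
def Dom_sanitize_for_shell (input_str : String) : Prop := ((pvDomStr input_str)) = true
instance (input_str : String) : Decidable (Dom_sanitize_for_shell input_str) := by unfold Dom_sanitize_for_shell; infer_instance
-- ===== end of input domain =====

-- B replaces A's 18 sequential full-string replace passes by a single pass over the
-- input filtering characters by membership in a constant set (objective: simpler).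

-- ===== PORT A =====
-- the 18 dangerous characters, as one-character strings (A's list)
def dangerousCharsA : List String :=
  ["$", "`", "|", ";", "&", "<", ">", "(", ")", "{", "}", "[", "]", "*", "?", "!", "\n", "\r"]

def sanitize_for_shell (input_str : String) : String :=
  if input_str = "" then ""
  else dangerousCharsA.foldl (fun sanitized ch => PySem.Str.replace sanitized ch "") input_str

-- ===== PORT B =====
-- the dangerous characters as a set of chars (B's set literal)
def dangerousSetB : List Char :=
  ['$', '`', '|', ';', '&', '<', '>', '(', ')', '{', '}', '[', ']', '*', '?', '!', '\n', '\r']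

def sanitize_for_shell_alt (input_str : String) : String :=
  if input_str = "" then ""
  else String.ofList (input_str.toList.filter (fun c => !(dangerousSetB.contains c)))

-- ===== PRECONDITION & SPEC =====
def Spec_sanitize_for_shell (input_str : String) (out : String) : Prop := out = sanitize_for_shell_alt input_str
instance (input_str : String) (out : String) : Decidable (Spec_sanitize_for_shell input_str out) := by unfold Spec_sanitize_for_shell; infer_instance

-- ===== CLAIM (what is proved, stated in full; the proofs are below) =====
def Claim_equal_sanitize_for_shell : Prop := ∀ (input_str : String), Dom_sanitize_for_shell input_str → Spec_sanitize_for_shell input_str (sanitize_for_shell input_str)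

-- ===== LEMMAS AND PROOFS =====

-- replace.go with a single-char pattern and empty replacement is a filter (given enough fuel)
theorem replace_go_single (d : Char) :
    ∀ (fuel : Nat) (l acc : List Char), l.length ≤ fuel →
      PySem.Chars.replace.go [d] [] fuel l acc = acc.reverse ++ l.filter (· ≠ d) := by
  intro fuel
  induction fuel with
  | zero =>
    intro l acc h
    have : l = [] := List.eq_nil_of_length_eq_zero (Nat.le_zero.mp h)
    subst this
    simp [PySem.Chars.replace.go]
  | succ n ih =>
    intro l acc h
    cases l with
    | nil => simp [PySem.Chars.replace.go]
    | cons c t =>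
      simp only [PySem.Chars.replace.go]
      by_cases hc : c = d
      · subst hc
        simp only [List.isPrefixOf, List.isPrefixOf_nil_left, beq_self_eq_true, Bool.true_and,
          if_pos]
        simp only [List.length_cons, List.length_nil, List.drop_succ_cons, List.drop_zero,
          List.reverse_nil, List.nil_append]
        rw [ih _ _ (by simpa using Nat.le_of_succ_le_succ h)]
        simp [List.filter_cons]
      · rw [show List.isPrefixOf [d] (c :: t) = false by
          simp [List.isPrefixOf]; exact fun hdc => (hc hdc.symm).elim]
        simp only [Bool.false_eq_true, if_false]
        rw [ih _ _ (by simpa using Nat.le_of_succ_le_succ h)]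
        simp [List.filter_cons, hc]

-- replacing one character by "" = filtering it out, on the char-list level
theorem replace_single_char (s : List Char) (d : Char) :
    PySem.Chars.replace s [d] [] = s.filter (· ≠ d) := by
  unfold PySem.Chars.replace
  simp only [List.isEmpty_cons, Bool.false_eq_true, if_false]
  rw [replace_go_single d s.length s [] (le_refl _)]
  simp

-- folding single-char filters = one filter by non-membership in the list of chars
theorem foldl_filter_eq (ds : List Char) :
    ∀ (l : List Char),
      ds.foldl (fun acc d => acc.filter (· ≠ d)) l = l.filter (fun c => !(ds.contains c)) := by
  induction ds with
  | nil => intro l; simp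
  | cons d ds ih =>
    intro l
    simp only [List.foldl_cons, ih, List.filter_filter]
    apply List.filter_congr
    intro c _
    by_cases h : c = d <;> simp [h]

theorem toList_sanitize (s : String) :
    (dangerousCharsA.foldl (fun sanitized ch => PySem.Str.replace sanitized ch "") s).toList
      = s.toList.filter (fun c => !(dangerousSetB.contains c)) := by
  have key : ∀ (cs : List String) (ds : List Char), cs = ds.map (fun d => String.ofList [d]) →
      (cs.foldl (fun sanitized ch => PySem.Str.replace sanitized ch "") s).toList
        = ds.foldl (fun acc d => acc.filter (· ≠ d)) s.toList := by
    intro cs ds hcd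
    subst hcd
    induction ds generalizing s with
    | nil => simp
    | cons d ds ih =>
      simp only [List.map_cons, List.foldl_cons]
      rw [ih (PySem.Str.replace s (String.ofList [d]) "")]
      congr 1
      rw [PySem.Str.toList_replace]
      rw [String.toList_ofList,
          show ("" : String).toList = [] from rfl]
      exact replace_single_char s.toList d
  rw [key dangerousCharsA dangerousSetB (by decide), foldl_filter_eq]

-- ===== VERDICT (by name: the statement is the Claim_ definition above) =====
theorem sanitize_for_shell_spec : Claim_equal_sanitize_for_shell := by
  intro s _
  unfold Spec_sanitize_for_shell sanitize_for_shell sanitize_for_shell_alt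
  by_cases h : s = ""
  · simp [h]
  · simp only [h, if_false]
    apply String.ext  -- equal toLists
    rw [toList_sanitize, String.toList_ofList]
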